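-- pv_equiv track=rewrite | github.com/Ayyub2110/AI-Credential-attack-auth-logic-analyzer | src/tools/burp_parser.py | extract_authentication_headers
-- ===== SOURCE A (Python) =====
-- from typing import Dict, Optional, Tuple
--
-- def extract_authentication_headers(parsed_request: Dict) -> Dict:
--     """
--     Extract authentication-related headers from parsed request.
--
--     Args:
--         parsed_request (Dict): Output from parse_request()
--
--     Returns:
--         Dict: Authentication headers including:
--             - authorization: Authorization header value
--             - cookies: Cookie header value
--             - bearer_token: Extracted Bearer token if present
--             - api_key: API key if present in headers
--     """
--     headers = parsed_request.get("headers", {})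
--     auth_data = {
--         "authorization": None,
--         "cookies": None,
--         "bearer_token": None,
--         "api_key": None
--     }
--
--     # Check for Authorization header
--     for header_name, header_value in headers.items():
--         if header_name.lower() == "authorization":
--             auth_data["authorization"] = header_value
--             # Extract Bearer token if present
--             if header_value.startswith("Bearer "):
--                 auth_data["bearer_token"] = header_value.split("Bearer ", 1)[1]
--         elif header_name.lower() == "cookie":
--             auth_data["cookies"] = header_value
--         elif header_name.lower() in ["x-api-key", "api-key"]:
--             auth_data["api_key"] = header_value
--
--     return auth_data
-- ===== SOURCE B (Python) =====
-- def extract_authentication_headers(parsed_request):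
--     """Idiomatic re-implementation: normalize headers once into a lowercased
--     dict, then fill auth_data by direct lookups instead of a branching scan."""
--     headers = parsed_request.get("headers", {})
--     items = list(headers.items())
--     norm = {k.lower(): v for k, v in items}
--     auth = norm.get("authorization")
--     if auth is not None and auth.startswith("Bearer "):
--         bearer = auth.split("Bearer ", 1)[1]
--     else:
--         bearer = None
--     api_key = next(
--         (v for k, v in reversed(items) if k.lower() in ("x-api-key", "api-key")),
--         None,
--     )
--     return {
--         "authorization": auth,
--         "cookies": norm.get("cookie"),
--         "bearer_token": bearer,
--         "api_key": api_key,
--     }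
-- ===== Notes on version B (the rewrite author's own statement) =====
-- stated objective: idiomatic
-- what changed: Replaces A's four-way branching scan with a lowercased-key index dict built in one pass plus direct lookups (authorization/cookie), deriving bearer_token from the final authorization value and api_key by a single reverse search over both variants.
-- intended difference: On requests with several case-variant 'authorization' headers where an earlier one starts with 'Bearer ' but the last one does not, A returns the stale token of the earlier header as bearer_token while B returns None; B is intended because bearer_token should be derived from the effective (last-wins) authorization value. — e.g. on extract_authentication_headers([("headers", [("Authorization", "Bearer x"), ("authorization", "y")])]): A returns [("authorization", some "y"), ("cookies", none), ("bearer_token", some "x"), ("api_key", none)], B returns [("authorization", some "y"), ("cookies", none), ("bearer_token", none), ("api_key", none)]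
import Mathlib
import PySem

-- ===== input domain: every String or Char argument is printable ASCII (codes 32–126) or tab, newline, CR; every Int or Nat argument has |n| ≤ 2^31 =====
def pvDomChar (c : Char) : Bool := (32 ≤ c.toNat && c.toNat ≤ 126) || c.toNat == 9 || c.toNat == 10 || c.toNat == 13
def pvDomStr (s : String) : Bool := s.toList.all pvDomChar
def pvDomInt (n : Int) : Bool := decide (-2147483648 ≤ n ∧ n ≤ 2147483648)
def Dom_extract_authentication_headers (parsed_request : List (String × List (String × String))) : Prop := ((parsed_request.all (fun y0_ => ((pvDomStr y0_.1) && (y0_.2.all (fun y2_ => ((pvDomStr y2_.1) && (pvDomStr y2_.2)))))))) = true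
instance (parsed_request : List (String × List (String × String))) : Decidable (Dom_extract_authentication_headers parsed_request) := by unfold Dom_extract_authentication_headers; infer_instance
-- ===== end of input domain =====

-- B replaces A's four-way branching scan with a lowercased-key index dict plus direct lookups
-- (objective: idiomatic); B derives bearer_token from the effective authorization value, so on
-- duplicate case-variant authorization headers with a stale earlier Bearer value the two differ (D_ below).

-- ===== PORT A =====
-- value.split("Bearer ", 1)[1]  (the match guard only makes the [1] index total)
def pvTok (v : String) : Option String :=
  match PySem.Str.splitMax? v "Bearer " 1 with
  | some (_ :: t :: _) => some t
  | _ => none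
-- loop body of A, branches in source order; state = (authorization, cookies, bearer_token, api_key)
def pvStepA (st : Option String × Option String × Option String × Option String)
    (p : String × String) : Option String × Option String × Option String × Option String :=
  if PySem.Str.lower p.1 == "authorization" then
    (some p.2, st.2.1,
     (if PySem.Str.startswith p.2 "Bearer " then pvTok p.2 else st.2.2.1), st.2.2.2)
  else if PySem.Str.lower p.1 == "cookie" then
    (st.1, some p.2, st.2.2.1, st.2.2.2)
  else if ["x-api-key", "api-key"].contains (PySem.Str.lower p.1) then
    (st.1, st.2.1, st.2.2.1, some p.2)
  else st

def extract_authentication_headers (parsed_request : List (String × List (String × String))) : List (String × Option String) :=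
  let headers := (PySem.Dict.mk parsed_request).getD "headers" []
  let st := headers.foldl pvStepA (none, none, none, none)
  [("authorization", st.1), ("cookies", st.2.1), ("bearer_token", st.2.2.1), ("api_key", st.2.2.2)]

-- ===== PORT B =====
def pvApiPred (p : String × String) : Bool :=
  ["x-api-key", "api-key"].contains (PySem.Str.lower p.1)

def extract_authentication_headers_alt (parsed_request : List (String × List (String × String))) : List (String × Option String) :=
  let items := (PySem.Dict.mk parsed_request).getD "headers" []
  let norm := PySem.Dict.ofList (items.map (fun p => (PySem.Str.lower p.1, p.2)))
  let auth := norm.get? "authorization"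
  let bearer := match auth with
    | some v => if PySem.Str.startswith v "Bearer " then pvTok v else none
    | none => none
  let api := (items.reverse.find? pvApiPred).map (·.2)
  [("authorization", auth), ("cookies", norm.get? "cookie"), ("bearer_token", bearer), ("api_key", api)]

-- ===== PRECONDITION & SPEC =====
-- On requests whose headers have several case-variant 'authorization' entries where an earlier
-- one starts with "Bearer " but the last one does not, A returns the stale earlier token as
-- bearer_token while B returns none; B's value is intended since bearer_token should come from
-- the effective (last-wins) authorization value.
def D_extract_authentication_headers (parsed_request : List (String × List (String × String))) : Prop :=
  let a := (((List.lookup "headers" parsed_request).getD []).filter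
    (fun p => PySem.Str.lower p.1 == "authorization")).map (·.2)
  a.any (PySem.Str.startswith · "Bearer ") = true ∧
  a.getLast?.all (! PySem.Str.startswith · "Bearer ") = true
instance (parsed_request : List (String × List (String × String))) : Decidable (D_extract_authentication_headers parsed_request) := by unfold D_extract_authentication_headers; infer_instance

def Spec_extract_authentication_headers (parsed_request : List (String × List (String × String))) (out : List (String × Option String)) : Prop := ¬ D_extract_authentication_headers parsed_request → out = extract_authentication_headers_alt parsed_request
instance (parsed_request : List (String × List (String × String))) (out : List (String × Option String)) : Decidable (Spec_extract_authentication_headers parsed_request out) := by unfold Spec_extract_authentication_headers; infer_instance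

def pvDiffWitness_extract_authentication_headers : (List (String × List (String × String))) :=
  [("headers", [("Authorization", "Bearer x"), ("authorization", "y")])]
def pvDiffWitnessOut_extract_authentication_headers : (List (String × Option String)) × (List (String × Option String)) :=
  ([("authorization", some "y"), ("cookies", none), ("bearer_token", some "x"), ("api_key", none)],
   [("authorization", some "y"), ("cookies", none), ("bearer_token", none), ("api_key", none)])

-- ===== CLAIM (what is proved, stated in full; the proofs are below) =====
def Claim_unchanged_extract_authentication_headers : Prop := ∀ (parsed_request : List (String × List (String × String))), Dom_extract_authentication_headers parsed_request → Spec_extract_authentication_headers parsed_request (extract_authentication_headers parsed_request)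
def Claim_changed_extract_authentication_headers : Prop := Dom_extract_authentication_headers (pvDiffWitness_extract_authentication_headers) ∧ D_extract_authentication_headers (pvDiffWitness_extract_authentication_headers) ∧ extract_authentication_headers (pvDiffWitness_extract_authentication_headers) = pvDiffWitnessOut_extract_authentication_headers.1 ∧ extract_authentication_headers_alt (pvDiffWitness_extract_authentication_headers) = pvDiffWitnessOut_extract_authentication_headers.2 ∧ pvDiffWitnessOut_extract_authentication_headers.1 ≠ pvDiffWitnessOut_extract_authentication_headers.2
def Claim_exact_extract_authentication_headers : Prop := ∀ (parsed_request : List (String × List (String × String))), Dom_extract_authentication_headers parsed_request → D_extract_authentication_headers parsed_request → extract_authentication_headers parsed_request ≠ extract_authentication_headers_alt parsed_request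

-- ===== LEMMAS AND PROOFS =====

-- last value among the entries of l whose name satisfies pred
def pvLastVal (pred : String × String → Bool) (l : List (String × String)) : Option String :=
  (l.reverse.find? pred).map (·.2)

def pvAuthP (p : String × String) : Bool := PySem.Str.lower p.1 == "authorization"
def pvCookP (p : String × String) : Bool := PySem.Str.lower p.1 == "cookie"
def pvBearP (p : String × String) : Bool := pvAuthP p && PySem.Str.startswith p.2 "Bearer "

-- characterization of A's loop from an arbitrary start state
theorem pvFoldA (l : List (String × String)) (a c b k : Option String) :
    l.foldl pvStepA (a, c, b, k) =
      ((pvLastVal pvAuthP l).or a, (pvLastVal pvCookP l).or c,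
       ((l.reverse.find? pvBearP).map (fun p => pvTok p.2)).getD b,
       (pvLastVal pvApiPred l).or k) := by
  induction l generalizing a c b k with
  | nil => simp [pvLastVal]
  | cons p t ih =>
    rw [List.foldl_cons, ih]
    simp only [pvLastVal, List.reverse_cons, List.find?_append]
    by_cases h1 : PySem.Str.lower p.1 == "authorization"
    · have e1 : PySem.Str.lower p.1 = "authorization" := by simpa using h1
      have eC : pvCookP p = false := by simp [pvCookP, e1]
      have eK : pvApiPred p = false := by simp [pvApiPred, e1]
      by_cases h2 : PySem.Chars.startswith p.2.toList ['B', 'e', 'a', 'r', 'e', 'r', ' '] = true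
      · cases hA : t.reverse.find? pvAuthP <;> cases hB : t.reverse.find? pvBearP <;>
          simp [pvStepA, pvAuthP, pvBearP, PySem.Str.startswith, e1, eC, eK, h2]
      · have h2f : PySem.Chars.startswith p.2.toList ['B', 'e', 'a', 'r', 'e', 'r', ' '] = false :=
          Bool.eq_false_iff.mpr h2
        cases hA : t.reverse.find? pvAuthP <;>
          simp [pvStepA, pvAuthP, pvBearP, PySem.Str.startswith, e1, eC, eK, h2f]
    · have eA : pvAuthP p = false := Bool.eq_false_iff.mpr h1
      by_cases h3 : PySem.Str.lower p.1 == "cookie"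
      · have e3 : PySem.Str.lower p.1 = "cookie" := by simpa using h3
        have eK : pvApiPred p = false := by simp [pvApiPred, e3]
        cases hC : t.reverse.find? pvCookP <;>
          simp [pvStepA, pvCookP, pvBearP, e3, eA, eK]
      · have eC : pvCookP p = false := Bool.eq_false_iff.mpr h3
        by_cases h4 : ["x-api-key", "api-key"].contains (PySem.Str.lower p.1)
        · have hor : PySem.Str.lower p.1 = "x-api-key" ∨ PySem.Str.lower p.1 = "api-key" := by
            simpa using h4
          have eK : pvApiPred p = true := h4
          cases hK : t.reverse.find? pvApiPred <;>
            simp [pvStepA, pvBearP, eA, eC, eK, h1, h3, hor]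
        · have hnor : ¬ (PySem.Str.lower p.1 = "x-api-key" ∨ PySem.Str.lower p.1 = "api-key") := by
            simpa using h4
          have eK : pvApiPred p = false := Bool.eq_false_iff.mpr h4
          simp [pvStepA, pvBearP, eA, eC, eK, h1, h3, hnor]

-- lookup in a dict built from a pair list is the value of the last pair with that key
theorem pvOfListGet? (pl : List (String × String)) (q : String) :
    (PySem.Dict.ofList pl).get? q = (pl.reverse.find? (fun p => p.1 == q)).map (·.2) := by
  induction pl using List.reverseRecOn with
  | nil => simp [PySem.Dict.ofList, PySem.Dict.update]
  | append_singleton t p ih =>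
    have hins : PySem.Dict.ofList (t ++ [p]) = (PySem.Dict.ofList t).insert p.1 p.2 := by
      simp [PySem.Dict.ofList, PySem.Dict.update, List.foldl_append]
    rw [hins, PySem.Dict.get?_insert]
    simp only [List.reverse_append, List.reverse_singleton, List.singleton_append,
      List.find?_cons]
    by_cases hq : p.1 == q
    · obtain rfl : p.1 = q := by simpa using hq
      simp
    · have hne : ¬ q = p.1 := fun h => hq (by simp [h])
      simp [hq, hne, ih]

theorem pvNormGet? (items : List (String × String)) (q : String) :
    (PySem.Dict.ofList (items.map (fun p => (PySem.Str.lower p.1, p.2)))).get? q =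
      pvLastVal (fun p => PySem.Str.lower p.1 == q) items := by
  rw [pvOfListGet?, pvLastVal, ← List.map_reverse, List.find?_map]
  simp [Function.comp_def, Option.map_map]

-- a find? of a conjunction agrees with find? of the first conjunct when that hit satisfies both
theorem pvFindAnd {α : Type} (l : List α) (p q : α → Bool) (x : α)
    (hp : l.find? p = some x) (hq : q x = true) :
    l.find? (fun y => p y && q y) = some x := by
  induction l with
  | nil => simp at hp
  | cons z t ih =>
    by_cases hz : p z
    · rw [List.find?_cons_of_pos hz] at hp
      obtain rfl : z = x := by simpa using hp
      simp [hz, hq]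
    · rw [List.find?_cons_of_neg hz] at hp
      simpa [hz] using ih hp

theorem pvAnyFind {α : Type} (l : List α) (q : α → Bool) : (l.find? q).isSome = l.any q := by
  induction l with
  | nil => rfl
  | cons x t ih => cases hx : q x <;> simp [hx, ih]

theorem pvChainAny (hs : List (String × String)) :
    ((hs.filter (fun p => PySem.Str.lower p.1 == "authorization")).map (·.2)).any
        (fun v => PySem.Str.startswith v "Bearer ") = (hs.reverse.find? pvBearP).isSome := by
  rw [pvAnyFind, List.any_reverse]
  simp only [List.any_map, List.any_filter, Function.comp_def]
  rfl

theorem pvChainLast (hs : List (String × String)) :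
    ((hs.filter (fun p => PySem.Str.lower p.1 == "authorization")).map (·.2)).getLast? =
      (hs.reverse.find? pvAuthP).map (·.2) := by
  rw [List.getLast?_map, List.getLast?_eq_head?_reverse, ← List.filter_reverse, List.head?_filter]
  rfl

theorem pvLookupEq (pl : List (String × List (String × String))) (q : String) :
    List.lookup q pl = (PySem.Dict.mk pl).get? q := by
  induction pl with
  | nil => rfl
  | cons p t ih =>
    rw [PySem.Dict.get?_mk_cons]
    by_cases h : p.1 = q
    · subst h
      simp [List.lookup]
    · have h1 : (q == p.1) = false := by simpa using Ne.symm h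
      have h2 : (p.1 == q) = false := by simpa using h
      cases p
      simpa [List.lookup, h1, h2] using ih

theorem pvChainEq (pr : List (String × List (String × String))) (hs : List (String × String))
    (h : (PySem.Dict.mk pr).get? "headers" = some hs) :
    (((List.lookup "headers" pr).getD []).filter
        (fun p => PySem.Str.lower p.1 == "authorization")).map (·.2) =
      (hs.filter (fun p => PySem.Str.lower p.1 == "authorization")).map (·.2) := by
  rw [pvLookupEq, h]
  rfl

theorem pvChainNone (pr : List (String × List (String × String)))
    (h : (PySem.Dict.mk pr).get? "headers" = none) :
    (((List.lookup "headers" pr).getD []).filter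
        (fun p => PySem.Str.lower p.1 == "authorization")).map (·.2) = ([] : List String) := by
  rw [pvLookupEq, h]
  rfl

theorem pvGoZero (sep : List Char) (f : Nat) (r : List Char) (acc : List (List Char)) :
    PySem.Chars.splitOnMax.go sep (f + 1) 0 r [] acc = (r :: acc).reverse := by
  cases r with
  | nil => simp [PySem.Chars.splitOnMax.go]
  | cons c rest => simp [PySem.Chars.splitOnMax.go]

theorem pvSplitGo (c : Char) (s r : List Char) :
    PySem.Chars.splitOnMax ((c :: s) ++ r) (c :: s) 1 = [[], r] := by
  unfold PySem.Chars.splitOnMax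
  rw [if_neg (by norm_num)]
  have hlen : ((c :: s) ++ r).length + 1 = ((s ++ r).length + 1) + 1 := by simp
  rw [hlen]
  rw [show ((c :: s) ++ r) = c :: (s ++ r) from rfl]
  rw [show ((1 : Int).toNat) = 1 from rfl]
  rw [PySem.Chars.splitOnMax.go]
  simp only [if_neg (by omega : ¬ (1 : Nat) = 0)]
  rw [if_pos (by
    have : (c :: s) <+: (c :: (s ++ r)) := ⟨r, rfl⟩
    exact List.isPrefixOf_iff_prefix.mpr this)]
  have hdrop : List.drop (c :: s).length (c :: (s ++ r)) = r := by
    simp [List.drop_left']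
  rw [hdrop]
  rw [show (1 : Nat) - 1 = 0 from rfl]
  rw [show (List.reverse ([] : List Char) :: []) = [([] : List Char)] from rfl]
  rw [pvGoZero]
  rfl

-- the token A extracts is always present when the value starts with "Bearer "
theorem pvTokSome (v : String) (h : PySem.Str.startswith v "Bearer " = true) :
    ∃ t, pvTok v = some t := by
  unfold pvTok
  have hpre : ("Bearer ".toList) <+: v.toList := by
    rw [PySem.Str.startswith] at h
    exact (PySem.Chars.startswith_iff _ _).mp h
  obtain ⟨r, hr⟩ := hpre
  have hv : v.toList = ('B' :: "earer ".toList) ++ r := by rw [← hr]; rfl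
  have hsplit : PySem.Chars.splitMax? v.toList "Bearer ".toList 1 = some [[], r] := by
    rw [PySem.Chars.splitMax?, if_neg (by decide)]
    rw [show ("Bearer ".toList) = ('B' :: "earer ".toList) from rfl, hv, pvSplitGo]
  refine ⟨String.ofList r, ?_⟩
  rw [PySem.Str.splitMax?]
  rw [show ("Bearer " : String).toList = "Bearer ".toList from rfl] at hsplit
  rw [hsplit]
  rfl

-- ===== VERDICT (by name: the statement is the Claim_ definition above) =====
theorem extract_authentication_headers_spec : Claim_unchanged_extract_authentication_headers := by
  intro pr _ hnd
  show extract_authentication_headers pr = extract_authentication_headers_alt pr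
  unfold extract_authentication_headers extract_authentication_headers_alt
  rw [PySem.Dict.getD_eq_get?_getD]
  cases hget : (PySem.Dict.mk pr).get? "headers" with
  | none =>
    simp [PySem.Dict.ofList, PySem.Dict.update]
  | some hs =>
    simp only [Option.getD_some]
    have hauth : (PySem.Dict.ofList (hs.map (fun p => (PySem.Str.lower p.1, p.2)))).get? "authorization" = pvLastVal pvAuthP hs := by
      rw [pvNormGet?]; rfl
    have hcook : (PySem.Dict.ofList (hs.map (fun p => (PySem.Str.lower p.1, p.2)))).get? "cookie" = pvLastVal pvCookP hs := by
      rw [pvNormGet?]; rfl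
    cases hA : hs.reverse.find? pvAuthP with
    | none =>
      have hnB : hs.reverse.find? pvBearP = none := by
        rw [List.find?_eq_none] at hA ⊢
        intro x hx hbx
        exact hA x hx (by simp only [pvBearP, Bool.and_eq_true] at hbx; exact hbx.1)
      simp [pvFoldA, hauth, hcook, pvLastVal, hA, hnB]
    | some pv =>
      by_cases h2 : PySem.Str.startswith pv.2 "Bearer " = true
      · have h2c : PySem.Chars.startswith pv.2.toList ['B', 'e', 'a', 'r', 'e', 'r', ' '] = true := h2
        have hB : hs.reverse.find? pvBearP = some pv :=
          pvFindAnd hs.reverse pvAuthP (fun p => PySem.Str.startswith p.2 "Bearer ") pv hA h2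
        simp [pvFoldA, hauth, hcook, pvLastVal, hA, hB, h2c]
      · have h2f : PySem.Str.startswith pv.2 "Bearer " = false := Bool.eq_false_iff.mpr h2
        have h2c : PySem.Chars.startswith pv.2.toList ['B', 'e', 'a', 'r', 'e', 'r', ' '] = false := h2f
        cases hBfind : hs.reverse.find? pvBearP with
        | none => simp [pvFoldA, hauth, hcook, pvLastVal, hA, hBfind, h2c]
        | some q =>
          exfalso
          apply hnd
          unfold D_extract_authentication_headers
          refine ⟨?_, ?_⟩
          · rw [pvChainEq pr hs hget, pvChainAny, hBfind]; rfl
          · rw [pvChainEq pr hs hget, pvChainLast, hA]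
            simp [PySem.Str.startswith, h2c]

theorem extract_authentication_headers_changed : Claim_changed_extract_authentication_headers := by
  unfold Claim_changed_extract_authentication_headers; decide

theorem extract_authentication_headers_tight : Claim_exact_extract_authentication_headers := by
  intro pr _ hD heq
  unfold D_extract_authentication_headers at hD
  obtain ⟨h1, h2⟩ := hD
  cases hget : (PySem.Dict.mk pr).get? "headers" with
  | none => rw [pvChainNone pr hget] at h1; simp at h1
  | some hs =>
    rw [pvChainEq pr hs hget, pvChainAny] at h1
    obtain ⟨qp, hq⟩ := Option.isSome_iff_exists.mp h1
    have hbq : pvBearP qp = true := List.find?_some hq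
    rw [pvBearP, Bool.and_eq_true] at hbq
    obtain ⟨t, ht⟩ := pvTokSome qp.2 hbq.2
    rw [pvChainEq pr hs hget, pvChainLast] at h2
    obtain ⟨pv, hA⟩ : ∃ pv, hs.reverse.find? pvAuthP = some pv := by
      cases hA' : hs.reverse.find? pvAuthP with
      | none =>
        exfalso
        rw [List.find?_eq_none] at hA'
        exact absurd hbq.1 (hA' qp (List.mem_of_find?_eq_some hq))
      | some pv => exact ⟨pv, rfl⟩
    rw [hA] at h2
    have hnostartc : PySem.Chars.startswith pv.2.toList ['B', 'e', 'a', 'r', 'e', 'r', ' '] = false := by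
      simpa [PySem.Str.startswith] using h2
    have hauth : (PySem.Dict.ofList (hs.map (fun p => (PySem.Str.lower p.1, p.2)))).get? "authorization" = pvLastVal pvAuthP hs := by
      rw [pvNormGet?]; rfl
    have hAbear : (extract_authentication_headers pr)[2]? = some ("bearer_token", some t) := by
      simp [extract_authentication_headers, PySem.Dict.getD_eq_get?_getD, hget, pvFoldA, hq, ht]
    have hBbear : (extract_authentication_headers_alt pr)[2]? = some ("bearer_token", (none : Option String)) := by
      simp [extract_authentication_headers_alt, PySem.Dict.getD_eq_get?_getD, hget, hauth,
        pvLastVal, hA, hnostartc]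
    rw [heq, hBbear] at hAbear
    simp at hAbear
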